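-- pv_equiv track=rewrite | github.com/Paulie-Aditya/g4g_problems | Easy/Minimum Integer/minimum-integer.py | minimumInteger
-- ===== SOURCE A (Python) =====
-- from typing import List
--
-- def minimumInteger(N : int, A : List[int]) -> int:
--     # code here
--     A.sort()
--     S=sum(A)
--     min=0
--     for i in A:
--         if S<=N*i:
--             min=i
--             break
--     return min
-- ===== SOURCE B (Python) =====
-- from typing import List
--
-- def minimumInteger(N: int, A: List[int]) -> int:
--     # One pass, no sorting: track the smallest element whose N-multiple reaches the sum.
--     # (Unlike A, this does not sort A in place.)
--     S = sum(A)
--     best = 0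
--     found = False
--     for x in A:
--         if N * x >= S and (not found or x < best):
--             best = x
--             found = True
--     return best
-- ===== Notes on version B (the rewrite author's own statement) =====
-- stated objective: faster
-- what changed: B replaces sort-then-scan-for-first-match by a single pass that keeps the minimum qualifying element; A also sorts A in place while B leaves it untouched (return value unaffected).
import Mathlib
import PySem

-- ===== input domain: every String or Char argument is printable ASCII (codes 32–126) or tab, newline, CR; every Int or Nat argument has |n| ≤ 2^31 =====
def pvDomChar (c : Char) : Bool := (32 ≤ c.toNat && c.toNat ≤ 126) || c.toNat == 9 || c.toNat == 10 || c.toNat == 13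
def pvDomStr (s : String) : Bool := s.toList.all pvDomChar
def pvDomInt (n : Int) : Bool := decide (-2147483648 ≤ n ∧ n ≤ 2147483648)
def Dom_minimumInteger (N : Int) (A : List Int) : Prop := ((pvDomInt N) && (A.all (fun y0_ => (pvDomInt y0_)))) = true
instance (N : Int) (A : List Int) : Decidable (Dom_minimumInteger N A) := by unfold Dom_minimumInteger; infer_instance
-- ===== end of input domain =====

-- B replaces A's sort-then-first-match by one pass keeping the minimum qualifying element (faster: O(n) vs O(n log n)).
-- A sorts its list argument in place; B does not — the equivalence proved here is about the return value only.

-- ===== PORT A =====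
-- the for-loop with break: first i (in sorted order) with S <= N*i, else the initial 0
def minimumIntegerLoopA (N S : Int) : List Int → Int
  | [] => 0
  | i :: rest => if S ≤ N * i then i else minimumIntegerLoopA N S rest

def minimumInteger (N : Int) (A : List Int) : Int :=
  let As := PySem.List.sorted A (fun x => x) false
  let S := As.sum
  minimumIntegerLoopA N S As

-- ===== PORT B =====
-- the one-pass loop: state (best, found)
def minimumIntegerLoopB (N S : Int) : List Int → Int → Bool → Int
  | [], best, _ => best
  | x :: rest, best, found =>
      if S ≤ N * x ∧ (found = false ∨ x < best) then minimumIntegerLoopB N S rest x true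
      else minimumIntegerLoopB N S rest best found

def minimumInteger_alt (N : Int) (A : List Int) : Int :=
  let S := A.sum
  minimumIntegerLoopB N S A 0 false

-- ===== PRECONDITION & SPEC =====
def Spec_minimumInteger (N : Int) (A : List Int) (out : Int) : Prop := out = minimumInteger_alt N A
instance (N : Int) (A : List Int) (out : Int) : Decidable (Spec_minimumInteger N A out) := by unfold Spec_minimumInteger; infer_instance

-- ===== CLAIM (what is proved, stated in full; the proofs are below) =====
def Claim_equal_minimumInteger : Prop := ∀ (N : Int) (A : List Int), Dom_minimumInteger N A → Spec_minimumInteger N A (minimumInteger N A)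

-- ===== LEMMAS AND PROOFS =====

-- A's loop on a (≤)-sorted list: either no element qualifies and the result is 0,
-- or the result is a qualifying member that is ≤ every qualifying member.
theorem loopA_char (N S : Int) (L : List Int) (h : L.Pairwise (· ≤ ·)) :
    (minimumIntegerLoopA N S L = 0 ∧ ∀ x ∈ L, ¬ (S ≤ N * x)) ∨
    (S ≤ N * minimumIntegerLoopA N S L ∧ minimumIntegerLoopA N S L ∈ L ∧
      ∀ x ∈ L, S ≤ N * x → minimumIntegerLoopA N S L ≤ x) := by
  induction L with
  | nil => left; simp [minimumIntegerLoopA]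
  | cons i t ih =>
    rcases List.pairwise_cons.mp h with ⟨hle, ht⟩
    by_cases hp : S ≤ N * i
    · right
      simp only [minimumIntegerLoopA, if_pos hp]
      refine ⟨hp, List.mem_cons_self, ?_⟩
      intro x hx _
      rcases List.mem_cons.mp hx with rfl | hx
      · exact le_refl x
      · exact hle x hx
    · simp only [minimumIntegerLoopA, if_neg hp]
      rcases ih ht with ⟨h0, hnone⟩ | ⟨hq, hmem, hmin⟩
      · left
        refine ⟨h0, ?_⟩
        intro x hx
        rcases List.mem_cons.mp hx with rfl | hx
        · exact hp
        · exact hnone x hx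
      · right
        refine ⟨hq, List.mem_cons_of_mem _ hmem, ?_⟩
        intro x hx hpx
        rcases List.mem_cons.mp hx with rfl | hx
        · exact absurd hpx hp
        · exact hmin x hx hpx

-- B's loop after the first hit (found = true with qualifying best):
-- the result qualifies, comes from best or the rest, is ≤ best and ≤ every qualifying element of the rest.
theorem loopB_true (N S : Int) (L : List Int) : ∀ b : Int, S ≤ N * b →
    S ≤ N * minimumIntegerLoopB N S L b true ∧
    (minimumIntegerLoopB N S L b true = b ∨ minimumIntegerLoopB N S L b true ∈ L) ∧
    minimumIntegerLoopB N S L b true ≤ b ∧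
    ∀ x ∈ L, S ≤ N * x → minimumIntegerLoopB N S L b true ≤ x := by
  induction L with
  | nil => intro b hb; simp [minimumIntegerLoopB, hb]
  | cons x t ih =>
    intro b hb
    by_cases hc : S ≤ N * x ∧ ((true : Bool) = false ∨ x < b)
    · rw [minimumIntegerLoopB, if_pos hc]
      rcases hc with ⟨hpx, hor⟩
      have hxb : x < b := hor.resolve_left (by simp)
      obtain ⟨hq, hmem, hle, hmin⟩ := ih x hpx
      refine ⟨hq, ?_, le_trans hle (le_of_lt hxb), ?_⟩
      · rcases hmem with h | h
        · exact Or.inr (by rw [h]; exact List.mem_cons_self)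
        · exact Or.inr (List.mem_cons_of_mem _ h)
      · intro y hy hpy
        rcases List.mem_cons.mp hy with rfl | hy
        · exact hle
        · exact hmin y hy hpy
    · rw [minimumIntegerLoopB, if_neg hc]
      obtain ⟨hq, hmem, hle, hmin⟩ := ih b hb
      refine ⟨hq, ?_, hle, ?_⟩
      · rcases hmem with h | h
        · exact Or.inl h
        · exact Or.inr (List.mem_cons_of_mem _ h)
      · intro y hy hpy
        rcases List.mem_cons.mp hy with rfl | hy
        · -- condition failed but y qualifies: so ¬ y < b, hence b ≤ y
          have : ¬ ((true : Bool) = false ∨ y < b) := fun h => hc ⟨hpy, h⟩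
          have hby : b ≤ y := by
            by_contra hlt
            exact this (Or.inr (lt_of_not_ge fun h => hlt h))
          exact le_trans hle hby
        · exact hmin y hy hpy

-- B's loop from the initial state (0, false): no qualifier and result 0, or a minimal qualifying member.
theorem loopB_false (N S : Int) (L : List Int) :
    (minimumIntegerLoopB N S L 0 false = 0 ∧ ∀ x ∈ L, ¬ (S ≤ N * x)) ∨
    (S ≤ N * minimumIntegerLoopB N S L 0 false ∧ minimumIntegerLoopB N S L 0 false ∈ L ∧
      ∀ x ∈ L, S ≤ N * x → minimumIntegerLoopB N S L 0 false ≤ x) := by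
  induction L with
  | nil => left; simp [minimumIntegerLoopB]
  | cons x t ih =>
    by_cases hpx : S ≤ N * x
    · have hc : S ≤ N * x ∧ ((false : Bool) = false ∨ x < 0) := ⟨hpx, Or.inl rfl⟩
      right
      rw [minimumIntegerLoopB, if_pos hc]
      obtain ⟨hq, hmem, hle, hmin⟩ := loopB_true N S t x hpx
      refine ⟨hq, ?_, ?_⟩
      · rcases hmem with h | h
        · rw [h]; exact List.mem_cons_self
        · exact List.mem_cons_of_mem _ h
      · intro y hy hpy
        rcases List.mem_cons.mp hy with rfl | hy
        · exact hle
        · exact hmin y hy hpy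
    · have hc : ¬ (S ≤ N * x ∧ ((false : Bool) = false ∨ x < 0)) := fun h => hpx h.1
      rw [minimumIntegerLoopB, if_neg hc]
      rcases ih with ⟨h0, hnone⟩ | ⟨hq, hmem, hmin⟩
      · left
        refine ⟨h0, ?_⟩
        intro y hy
        rcases List.mem_cons.mp hy with rfl | hy
        · exact hpx
        · exact hnone y hy
      · right
        refine ⟨hq, List.mem_cons_of_mem _ hmem, ?_⟩
        intro y hy hpy
        rcases List.mem_cons.mp hy with rfl | hy
        · exact absurd hpy hpx
        · exact hmin y hy hpy

-- ===== VERDICT (by name: the statement is the Claim_ definition above) =====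
theorem minimumInteger_spec : Claim_equal_minimumInteger := by
  intro N A _
  unfold Spec_minimumInteger minimumInteger minimumInteger_alt
  simp only []
  have hperm : (PySem.List.sorted A (fun x => x) false).Perm A := PySem.List.sorted_perm A _ _
  have hsum : (PySem.List.sorted A (fun x => x) false).sum = A.sum := hperm.sum_eq
  set S := A.sum with hS
  rw [hsum]
  have hpw : (PySem.List.sorted A (fun x => x) false).Pairwise (fun a b => a ≤ b) :=
    PySem.List.sorted_pairwise A (fun x => x)
  have hA := loopA_char N S (PySem.List.sorted A (fun x => x) false) hpw
  have hB := loopB_false N S A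
  rcases hA with ⟨hA0, hAnone⟩ | ⟨hAq, hAmem, hAmin⟩
  · rcases hB with ⟨hB0, _⟩ | ⟨hBq, hBmem, _⟩
    · rw [hA0, hB0]
    · exact absurd hBq (hAnone _ (hperm.mem_iff.mpr hBmem))
  · rcases hB with ⟨_, hBnone⟩ | ⟨hBq, hBmem, hBmin⟩
    · exact absurd hAq (hBnone _ (hperm.mem_iff.mp hAmem))
    · exact le_antisymm
        (hAmin _ (hperm.mem_iff.mpr hBmem) hBq)
        (hBmin _ (hperm.mem_iff.mp hAmem) hAq)
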